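-- pv_equiv track=rewrite | github.com/wmelvin/marksplitz | src/marksplitz/marksplitz.py | extract_title_comments
-- ===== SOURCE A (Python) =====
-- def get_page_heading(num: int, text: str) -> tuple[str, int]:
--     """Return the first heading in the text and its heading-level.
--
--     If there is no heading, return a default heading level and title.
--     """
--     heading_level = 1
--     lines = text.splitlines()
--     for line in lines:
--         s = line.strip()
--         if s.startswith("#"):
--             a = s.split(" ", 1)
--             heading_level = a[0].count("#")
--             return (a[1].strip(), heading_level)
--     return (f"Page {num}", heading_level)
--
-- def extract_title_comments(num: int, text: str) -> tuple[str, str, int]: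
--     """Extract the title from a comment in the text.
--
--     Returns a tuple of the text, with title-comments removed, and the title
--     extracted from the comments.
--
--     There should only be one title comment in the text. If there is more than
--     one, the last one is used.
--
--     If there is no title comment, the first Markdown heading in the text is used
--     as the title.
--
--     The headling level is based on the first Markdown heading in the text.
--
--     Returns a tuple of the text, the title, and the heading level.
--     """
--     title = ""
--
--     # TODO: Should a title-comment also be able to set heading-level?
--     # If so, leading '#' characters could be used same as in Markdown.
--
--     # Look for, and remove, a title comment.
--     out_lines = []
--     lines = text.splitlines(keepends=True)
--     for line in lines:
--         s = line.strip()
--         if s.startswith("<!-- title: "):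
--             title = s[12:-3].strip()
--         else:
--             out_lines.append(line)
--
--     heading, heading_level = get_page_heading(num, text)
--
--     # If there was no title comment, use the first heading as the title.
--     if not title:
--         title = heading
--
--     return "".join(out_lines), title, heading_level
-- ===== SOURCE B (Python) =====
-- def extract_title_comments(num: int, text: str) -> tuple[str, str, int]:
--     """Single pass: remove title comments and find the first heading in one loop."""
--     title = ""
--     out_lines = []
--     heading = None
--     heading_level = 1
--     for line in text.splitlines(keepends=True):
--         s = line.strip()
--         if s.startswith("<!-- title: "):
--             title = s[12:-3].strip()
--         else:
--             out_lines.append(line)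
--             if heading is None and s.startswith("#"):
--                 a = s.split(" ", 1)
--                 heading_level = a[0].count("#")
--                 heading = a[1].strip()
--     if heading is None:
--         heading = f"Page {num}"
--     if not title:
--         title = heading
--     return "".join(out_lines), title, heading_level
-- ===== Notes on version B (the rewrite author's own statement) =====
-- stated objective: simpler
-- what changed: B replaces A's two scans (a title-comment removal pass plus a separate get_page_heading helper that re-splits the text and scans again for the first heading) with a single loop over the keepends-split lines that maintains title, output lines, and the first heading/level together.
import Mathlib
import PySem

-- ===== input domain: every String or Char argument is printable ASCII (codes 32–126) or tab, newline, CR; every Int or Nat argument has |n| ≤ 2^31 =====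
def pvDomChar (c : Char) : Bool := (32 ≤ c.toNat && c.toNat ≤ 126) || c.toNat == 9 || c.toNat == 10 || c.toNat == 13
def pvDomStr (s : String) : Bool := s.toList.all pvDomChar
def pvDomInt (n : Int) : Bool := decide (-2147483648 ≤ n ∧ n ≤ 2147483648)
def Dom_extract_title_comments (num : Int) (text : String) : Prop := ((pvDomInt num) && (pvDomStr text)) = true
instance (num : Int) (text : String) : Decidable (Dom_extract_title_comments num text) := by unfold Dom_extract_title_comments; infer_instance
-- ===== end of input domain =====

-- B rewrites A's two scans (title-comment removal pass + separate first-heading helper pass)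
-- as ONE loop over the keepends-split lines; objective: simpler. Same return value on Pre_.

-- ===== PORT A =====
-- hand-ported str.splitlines(keepends=True) (PySem has only the keepends=False form);
-- exact on Dom: the only line-break characters in Dom are '\n', '\r' and the pair '\r\n'.
def splitKeepGo : List Char → List Char → List (List Char) → List (List Char)
  | [], cur, acc => if cur.isEmpty then acc.reverse else (cur.reverse :: acc).reverse
  | '\r' :: '\n' :: rest, cur, acc => splitKeepGo rest [] ((cur.reverse ++ ['\r', '\n']) :: acc)
  | c :: rest, cur, acc =>
    if c == '\n' || c == '\r' then splitKeepGo rest [] ((cur.reverse ++ [c]) :: acc)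
    else splitKeepGo rest (c :: cur) acc

def splitlinesKeep (cs : List Char) : List (List Char) := splitKeepGo cs [] []

-- helper get_page_heading: the for-loop with early return, as structural recursion over the lines
def gphLoop (num : Int) : List (List Char) → List Char × Int
  | [] => ("Page ".toList ++ PySem.Int.toChars num, 1)
  | l :: ls =>
    let s := PySem.Chars.strip l
    if PySem.Chars.startswith s "#".toList then
      let a := (PySem.Chars.splitMax? s " ".toList 1).getD []
      (PySem.Chars.strip ((PySem.List.pyGet? a 1).getD []),
       ((PySem.Chars.count ((PySem.List.pyGet? a 0).getD []) "#".toList : Nat) : Int))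
    else gphLoop num ls

-- the title-comment removal loop of A, state (title, out_lines)
def aLoop : List (List Char) → List Char → List (List Char) → List Char × List (List Char)
  | [], title, out => (title, out)
  | line :: ls, title, out =>
    let s := PySem.Chars.strip line
    if PySem.Chars.startswith s "<!-- title: ".toList then
      aLoop ls (PySem.Chars.strip (PySem.Chars.slice s (some 12) (some (-3)))) out
    else aLoop ls title (out ++ [line])

def extract_title_comments (num : Int) (text : String) : String × String × Int :=
  let res := aLoop (splitlinesKeep text.toList) [] []
  let hh := gphLoop num (PySem.Chars.splitlines text.toList)
  let title := if res.1.isEmpty then hh.1 else res.1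
  (String.ofList (PySem.Chars.join [] res.2), String.ofList title, hh.2)

-- ===== PORT B =====
-- single loop, state (title, out_lines, heading : Option, heading_level)
def bLoop : List (List Char) → List Char → List (List Char) → Option (List Char) → Int →
    List Char × List (List Char) × Option (List Char) × Int
  | [], title, out, hd, hl => (title, out, hd, hl)
  | line :: ls, title, out, hd, hl =>
    let s := PySem.Chars.strip line
    if PySem.Chars.startswith s "<!-- title: ".toList then
      bLoop ls (PySem.Chars.strip (PySem.Chars.slice s (some 12) (some (-3)))) out hd hl
    else if hd.isNone && PySem.Chars.startswith s "#".toList then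
      let a := (PySem.Chars.splitMax? s " ".toList 1).getD []
      bLoop ls title (out ++ [line])
        (some (PySem.Chars.strip ((PySem.List.pyGet? a 1).getD [])))
        ((PySem.Chars.count ((PySem.List.pyGet? a 0).getD []) "#".toList : Nat) : Int)
    else bLoop ls title (out ++ [line]) hd hl

def extract_title_comments_alt (num : Int) (text : String) : String × String × Int :=
  let st := bLoop (splitlinesKeep text.toList) [] [] none 1
  let heading := st.2.2.1.getD ("Page ".toList ++ PySem.Int.toChars num)
  let title := if st.1.isEmpty then heading else st.1
  (String.ofList (PySem.Chars.join [] st.2.1), String.ofList title, st.2.2.2)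

-- ===== PRECONDITION & SPEC =====
-- Pre_ excludes exactly the inputs where the Python A raises IndexError: the first stripped
-- line that starts with '#' contains no ' ', so a[1] in get_page_heading does not exist.
def Pre_extract_title_comments (num : Int) (text : String) : Prop :=
  (((PySem.Chars.splitlines text.toList).map PySem.Chars.strip).find?
      (fun s => PySem.Chars.startswith s "#".toList)).all
    (fun s => PySem.Chars.isIn " ".toList s) = true
instance (num : Int) (text : String) : Decidable (Pre_extract_title_comments num text) := by
  unfold Pre_extract_title_comments; infer_instance

def pvWitness_extract_title_comments : Int × String := (1, "<!-- title: T -->\n# Hello\nworld\n")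

def Spec_extract_title_comments (num : Int) (text : String) (out : String × String × Int) : Prop := out = extract_title_comments_alt num text
instance (num : Int) (text : String) (out : String × String × Int) : Decidable (Spec_extract_title_comments num text out) := by unfold Spec_extract_title_comments; infer_instance

-- ===== CLAIM (what is proved, stated in full; the proofs are below) =====
def Claim_equal_extract_title_comments : Prop := ∀ (num : Int) (text : String), Dom_extract_title_comments num text → Pre_extract_title_comments num text → Spec_extract_title_comments num text (extract_title_comments num text)

-- ===== LEMMAS AND PROOFS =====

-- whitespace-suffix facts: stripping ignores a trailing run of whitespace
theorem rstrip_append_ws (x t : List Char) (h : ∀ c ∈ t, PySem.Chars.isspace c = true) :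
    PySem.Chars.rstrip (x ++ t) = PySem.Chars.rstrip x := by
  have ht : t.reverse.dropWhile PySem.Chars.isspace = [] := by
    rw [List.dropWhile_eq_nil_iff]; intro c hc; exact h c (List.mem_reverse.mp hc)
  simp [PySem.Chars.rstrip, List.reverse_append, List.dropWhile_append, ht]

theorem strip_append_ws (l t : List Char) (h : ∀ c ∈ t, PySem.Chars.isspace c = true) :
    PySem.Chars.strip (l ++ t) = PySem.Chars.strip l := by
  have ht : t.dropWhile PySem.Chars.isspace = [] := by
    rw [List.dropWhile_eq_nil_iff]; intro c hc; exact h c hc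
  simp only [PySem.Chars.strip, PySem.Chars.lstrip, List.dropWhile_append]
  by_cases hl : (l.dropWhile PySem.Chars.isspace).isEmpty
  · simp [ht, List.isEmpty_iff.mp hl]
  · simp only [hl, if_neg, Bool.not_eq_true] at *
    simp [rstrip_append_ws _ t h]

theorem ws_rn : ∀ c ∈ ['\r', '\n'], PySem.Chars.isspace c = true := by
  intro c hc
  rcases List.mem_cons.mp hc with h | h
  · subst h; rfl
  · rcases List.mem_cons.mp h with h | h
    · subst h; rfl
    · cases h

theorem ws_single (c : Char) (hc : (c == '\n' || c == '\r') = true) :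
    ∀ d ∈ [c], PySem.Chars.isspace d = true := by
  intro d hd
  rcases List.mem_cons.mp hd with h | h
  · subst h
    rcases Bool.or_eq_true_iff.mp hc with h | h <;> rw [beq_iff_eq] at h <;> subst h <;> rfl
  · cases h

-- on Dom, the break test of splitlines agrees with (c == '\n' || c == '\r')
theorem isB_dom (c : Char) (h : pvDomChar c = true) :
    ((decide (c.toNat = 10) || decide (c.toNat = 13) || decide (c.toNat = 11) || decide (c.toNat = 12) ||
      decide (c.toNat = 28) || decide (c.toNat = 29) || decide (c.toNat = 30) || decide (c.toNat = 133) ||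
      decide (c.toNat = 8232) || decide (c.toNat = 8233)) = (c == '\n' || c == '\r')) := by
  have h10 : (c == '\n') = decide (c.toNat = 10) := by
    rcases c with ⟨v, hv⟩
    simp [Char.toNat, BEq.beq, Char.ext_iff, ← UInt32.toNat_inj]
  have h13 : (c == '\r') = decide (c.toNat = 13) := by
    rcases c with ⟨v, hv⟩
    simp [Char.toNat, BEq.beq, Char.ext_iff, ← UInt32.toNat_inj]
  simp only [pvDomChar, Bool.or_eq_true, Bool.and_eq_true, decide_eq_true_eq, beq_iff_eq] at h
  rw [h10, h13,
    decide_eq_false (show ¬ c.toNat = 11 by omega), decide_eq_false (show ¬ c.toNat = 12 by omega),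
    decide_eq_false (show ¬ c.toNat = 28 by omega), decide_eq_false (show ¬ c.toNat = 29 by omega),
    decide_eq_false (show ¬ c.toNat = 30 by omega), decide_eq_false (show ¬ c.toNat = 133 by omega),
    decide_eq_false (show ¬ c.toNat = 8232 by omega), decide_eq_false (show ¬ c.toNat = 8233 by omega)]
  simp

-- the stripped lines of splitlines() and of splitlines(keepends=True) coincide on Dom
theorem go_strip (isB : Char → Bool)
    (hisB : ∀ c, pvDomChar c = true → isB c = (c == '\n' || c == '\r')) :
    ∀ (rest cur : List Char) (accK : List (List Char)) (accA : List (List Char)),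
    (∀ c ∈ rest, pvDomChar c = true) →
    accA.map PySem.Chars.strip = accK.map PySem.Chars.strip →
    (PySem.Chars.splitlines.go isB rest cur accA).map PySem.Chars.strip
      = (splitKeepGo rest cur accK).map PySem.Chars.strip := by
  intro rest cur accK
  induction rest, cur, accK using splitKeepGo.induct with
  | case1 cur acc hcur =>
    intro accA hdom hacc
    rw [PySem.Chars.splitlines.go.eq_def]
    simp [splitKeepGo, hcur, hacc]
  | case2 cur acc hcur =>
    intro accA hdom hacc
    rw [PySem.Chars.splitlines.go.eq_def]
    simp [splitKeepGo, hcur, hacc]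
  | case3 rest cur acc ih =>
    intro accA hdom hacc
    rw [PySem.Chars.splitlines.go.eq_def]
    simp only [splitKeepGo]
    apply ih
    · intro c hc; exact hdom c (by simp [hc])
    · simp only [List.map_cons, hacc]
      congr 1
      exact (strip_append_ws cur.reverse ['\r', '\n'] ws_rn).symm
  | case4 c rest cur acc hguard hc ih =>
    intro accA hdom hacc
    have hdc : pvDomChar c = true := hdom c (by simp)
    rw [PySem.Chars.splitlines.go.eq_def]
    split
    · simp_all
    · rename_i heq
      rw [List.cons_eq_cons] at heq
      exact absurd heq.1 (fun h1 => hguard _ h1 heq.2)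
    · rename_i c' rest' cur' acc' hguard' heq
      rw [List.cons_eq_cons] at heq
      obtain ⟨h1, h2⟩ := heq
      subst h1; subst h2
      rw [hisB c hdc, if_pos hc]
      conv_rhs => rw [splitKeepGo.eq_def]
      split
      · rename_i heq2; cases heq2
      · rename_i heq2
        rw [List.cons_eq_cons] at heq2
        exact absurd heq2.1 (fun h1 => hguard _ h1 heq2.2)
      · rename_i c2 rest2 cur2 acc2 hguard2 heq2
        rw [List.cons_eq_cons] at heq2
        obtain ⟨g1, g2⟩ := heq2
        subst g1; subst g2
        rw [if_pos hc]
        apply ih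
        · intro d hd; exact hdom d (by simp [hd])
        · simp only [List.map_cons, hacc]
          congr 1
          exact (strip_append_ws _ [c] (ws_single c hc)).symm
  | case5 c rest cur acc hguard hc ih =>
    intro accA hdom hacc
    rw [PySem.Chars.splitlines.go.eq_def]
    split
    · simp_all
    · rename_i heq
      rw [List.cons_eq_cons] at heq
      exact absurd heq.1 (fun h1 => hguard _ h1 heq.2)
    · rename_i c' rest' cur' acc' hguard' heq
      rw [List.cons_eq_cons] at heq
      obtain ⟨h1, h2⟩ := heq
      subst h1; subst h2
      rw [hisB c (hdom c (by simp)), if_neg hc]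
      conv_rhs => rw [splitKeepGo.eq_def]
      split
      · rename_i heq2; cases heq2
      · rename_i heq2
        rw [List.cons_eq_cons] at heq2
        exact absurd heq2.1 (fun h1 => hguard _ h1 heq2.2)
      · rename_i c2 rest2 cur2 acc2 hguard2 heq2
        rw [List.cons_eq_cons] at heq2
        obtain ⟨g1, g2⟩ := heq2
        subst g1; subst g2
        rw [if_neg hc]
        apply ih
        · intro d hd; exact hdom d (by simp [hd])
        · exact hacc

theorem splitlines_strip_eq (cs : List Char) (h : ∀ c ∈ cs, pvDomChar c = true) :
    (PySem.Chars.splitlines cs).map PySem.Chars.strip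
      = (splitlinesKeep cs).map PySem.Chars.strip := by
  unfold PySem.Chars.splitlines splitlinesKeep
  exact go_strip _ (fun c hc => isB_dom c hc) cs [] [] [] h rfl

-- gphLoop only looks at the stripped lines
theorem gphLoop_congr (num : Int) : ∀ (ls ls' : List (List Char)),
    ls.map PySem.Chars.strip = ls'.map PySem.Chars.strip →
    gphLoop num ls = gphLoop num ls' := by
  intro ls
  induction ls with
  | nil => intro ls' h; cases ls' with
    | nil => rfl
    | cons l' ls' => simp at h
  | cons l ls ih =>
    intro ls' h
    cases ls' with
    | nil => simp at h
    | cons l' ls' =>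
      simp only [List.map_cons, List.cons.injEq] at h
      obtain ⟨h1, h2⟩ := h
      simp only [gphLoop, h1]
      split
      · rfl
      · exact ih ls' h2

-- first-heading search, as an Option (used only by the proofs)
def hfind : List (List Char) → Option (List Char × Int)
  | [] => none
  | l :: ls =>
    let s := PySem.Chars.strip l
    if PySem.Chars.startswith s "#".toList then
      let a := (PySem.Chars.splitMax? s " ".toList 1).getD []
      some (PySem.Chars.strip ((PySem.List.pyGet? a 1).getD []),
            ((PySem.Chars.count ((PySem.List.pyGet? a 0).getD []) "#".toList : Nat) : Int))
    else hfind ls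

theorem gphLoop_eq_hfind (num : Int) (L : List (List Char)) :
    gphLoop num L = ((hfind L).getD ("Page ".toList ++ PySem.Int.toChars num, 1)) := by
  induction L with
  | nil => rfl
  | cons l ls ih =>
    simp only [gphLoop, hfind]
    split
    · rfl
    · simpa using ih

-- a line whose strip starts with "<!-- title: " does not start with "#"
theorem title_not_hash (s : List Char)
    (h : PySem.Chars.startswith s "<!-- title: ".toList = true) :
    PySem.Chars.startswith s "#".toList = false := by
  simp only [PySem.Chars.startswith] at h ⊢
  obtain ⟨u, hu⟩ := List.isPrefixOf_iff_prefix.mp h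
  have hs : s = '<' :: ("!-- title: ".toList ++ u) := by rw [← hu]; rfl
  subst hs
  simp [List.isPrefixOf]

theorem bLoop_some : ∀ (L : List (List Char)) (t : List Char) (o : List (List Char)) (p : List Char) (k : Int),
    bLoop L t o (some p) k = ((aLoop L t o).1, (aLoop L t o).2, some p, k) := by
  intro L
  induction L with
  | nil => intro t o p k; rfl
  | cons l ls ih =>
    intro t o p k
    simp only [bLoop, aLoop, Option.isNone_some, Bool.false_and]
    split_ifs with h1 h2 <;> first | exact h2.elim | simp [ih]

theorem bLoop_eq : ∀ (L : List (List Char)) (t : List Char) (o : List (List Char)),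
    bLoop L t o none 1 = ((aLoop L t o).1, (aLoop L t o).2,
      (hfind L).map Prod.fst, (((hfind L).map Prod.snd).getD 1)) := by
  intro L
  induction L with
  | nil => intro t o; rfl
  | cons l ls ih =>
    intro t o
    simp only [bLoop, aLoop, hfind, Option.isNone_none, Bool.true_and]
    by_cases h1 : PySem.Chars.startswith (PySem.Chars.strip l) "<!-- title: ".toList = true
    · rw [if_pos h1, if_pos h1, if_neg (by simpa using title_not_hash _ h1), ih]
    · rw [if_neg h1, if_neg h1]
      by_cases h3 : PySem.Chars.startswith (PySem.Chars.strip l) "#".toList = true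
      · rw [if_pos h3, if_pos h3, bLoop_some]
        simp
      · rw [if_neg h3, if_neg h3, ih]

-- ===== VERDICT (by name: the statement is the Claim_ definition above) =====
theorem extract_title_comments_spec : Claim_equal_extract_title_comments := by
  intro num text hdom _hpre
  have hdc : ∀ c ∈ text.toList, pvDomChar c = true := by
    simp only [Dom_extract_title_comments, pvDomStr, Bool.and_eq_true, List.all_eq_true] at hdom
    exact fun c hc => hdom.2 c hc
  unfold Spec_extract_title_comments extract_title_comments extract_title_comments_alt
  rw [gphLoop_congr num _ _ (splitlines_strip_eq text.toList hdc), gphLoop_eq_hfind, bLoop_eq]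
  cases hf : hfind (splitlinesKeep text.toList) with
  | none => simp
  | some p => simp
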